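-- pv_equiv track=rewrite | github.com/SamAduG1/statscout | backend/parlay_builder.py | filter_props_by_game
-- ===== SOURCE A (Python) =====
-- from typing import List, Dict, Any, Optional
--
-- def filter_props_by_game(
--
--     props: List[Dict],
--     game_filter: str,
--     selected_games: Optional[List[str]] = None
-- ) -> List[Dict]:
--     """
--     Filter props by game selection
--
--     Args:
--         props: All available props
--         game_filter: 'any', 'single', or 'specific'
--         selected_games: List of game IDs (e.g., ['LAL_vs_GSW', 'BOS_vs_MIA'])
--
--     Returns:
--         Filtered props
--     """
--     if game_filter == "any":
--         # Remove props from same game (avoid correlation)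
--         # Group by game, take max 1 per game
--         games_seen = set()
--         filtered = []
--         for prop in props:
--             game_id = f"{prop['team']}_vs_{prop['opponent']}"
--             if game_id not in games_seen:
--                 filtered.append(prop)
--                 games_seen.add(game_id)
--         return filtered
--
--     elif game_filter == "single":
--         # Only props from the same game (SGP)
--         if not props:
--             return []
--         # Group by game, find game with most props
--         from collections import defaultdict
--         games = defaultdict(list)
--         for prop in props:
--             game_id = f"{prop['team']}_vs_{prop['opponent']}"
--             games[game_id].append(prop)
--         # Return props from game with most options
--         best_game = max(games.items(), key=lambda x: len(x[1]))
--         return best_game[1]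
--
--     elif game_filter == "specific" and selected_games:
--         # Only props from selected games
--         filtered = []
--         for prop in props:
--             game_id = f"{prop['team']}_vs_{prop['opponent']}"
--             if game_id in selected_games:
--                 filtered.append(prop)
--         return filtered
--
--     return props
-- ===== SOURCE B (Python) =====
-- def filter_props_by_game(props, game_filter, selected_games=None):
--     if game_filter == "any":
--         first = {}
--         for prop in props:
--             first.setdefault(f"{prop['team']}_vs_{prop['opponent']}", prop)
--         return list(first.values())
--     if game_filter == "single":
--         if not props:
--             return []
--         counts = {}
--         for prop in props:
--             gid = f"{prop['team']}_vs_{prop['opponent']}"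
--             counts[gid] = counts.get(gid, 0) + 1
--         best, best_n = None, 0
--         for gid, n in counts.items():
--             if n > best_n:
--                 best, best_n = gid, n
--         return [p for p in props if f"{p['team']}_vs_{p['opponent']}" == best]
--     if game_filter == "specific" and selected_games:
--         wanted = set(selected_games)
--         return [p for p in props if f"{p['team']}_vs_{p['opponent']}" in wanted]
--     return props
-- ===== Notes on version B (the rewrite author's own statement) =====
-- stated objective: alternative
-- what changed: The 'single' branch no longer groups props into per-game lists: it builds a game_id->count table in one pass, picks the best game_id with a strict '>' scan over the table (matching max's first-wins tie-break), and re-filters props by that id; the 'any' branch keeps one dict of first props per game instead of a seen-set plus output list, and the 'specific' branch is a comprehension over a set of selected ids instead of an append loop.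
import Mathlib
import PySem

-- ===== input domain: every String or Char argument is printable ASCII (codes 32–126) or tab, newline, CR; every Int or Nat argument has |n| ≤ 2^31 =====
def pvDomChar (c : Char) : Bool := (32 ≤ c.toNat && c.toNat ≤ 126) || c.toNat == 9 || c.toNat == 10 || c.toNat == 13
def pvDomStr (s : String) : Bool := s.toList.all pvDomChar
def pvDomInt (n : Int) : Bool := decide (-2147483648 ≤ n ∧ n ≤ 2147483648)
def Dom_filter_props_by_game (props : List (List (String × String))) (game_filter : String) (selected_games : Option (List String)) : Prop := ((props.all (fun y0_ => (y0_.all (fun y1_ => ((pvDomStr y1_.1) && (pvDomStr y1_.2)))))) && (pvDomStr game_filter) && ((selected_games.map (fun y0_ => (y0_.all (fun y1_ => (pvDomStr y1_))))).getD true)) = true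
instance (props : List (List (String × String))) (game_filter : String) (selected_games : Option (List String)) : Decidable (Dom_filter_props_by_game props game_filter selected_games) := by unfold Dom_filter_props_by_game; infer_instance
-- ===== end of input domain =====

-- B (alt): the 'single' branch counts props per game and re-filters by the best game_id instead of
-- grouping into lists; 'any' keeps a dict of first props; 'specific' filters against a set — an
-- alternative decomposition of the same function, same asymptotic cost.

-- ===== PORT A =====
-- game_id = f"{prop['team']}_vs_{prop['opponent']}"; made total with a "" default — exact under
-- Pre_ (both keys present whenever a branch evaluates it). Shared by both ports: both Pythons
-- compute the very same f-string.
def pvGid (prop : List (String × String)) : String :=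
  (PySem.Dict.getD (PySem.Dict.ofList prop) "team" "") ++ "_vs_" ++
    (PySem.Dict.getD (PySem.Dict.ofList prop) "opponent" "")

-- games[game_id].append(prop) on a defaultdict(list)
def pvAStep (d : PySem.Dict String (List (List (String × String)))) (prop : List (String × String)) :
    PySem.Dict String (List (List (String × String))) :=
  d.modify (pvGid prop) [] (fun l => l ++ [prop])

-- max(games.items(), key=lambda x: len(x[1])): first maximal wins (strict '>' replacement)
def pvAMax (l : List (String × List (List (String × String))))
    (acc : Option (String × List (List (String × String)))) :
    Option (String × List (List (String × String))) :=
  l.foldl (fun acc kv =>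
    match acc with
    | none => some kv
    | some b => if b.2.length < kv.2.length then some kv else some b) acc

def filter_props_by_game (props : List (List (String × String))) (game_filter : String) (selected_games : Option (List String)) : List (List (String × String)) :=
  if game_filter = "any" then
    (props.foldl (fun (st : PySem.Set String × List (List (String × String))) prop =>
      let gid := pvGid prop
      if st.1.contains gid then st else (st.1.add gid, st.2 ++ [prop]))
      (PySem.Set.empty, [])).2
  else if game_filter = "single" then
    if props = [] then []
    else
      match pvAMax (props.foldl pvAStep PySem.Dict.empty).items none with
      | some best => best.2
      | none => []          -- unreachable: props ≠ [] makes the items list nonempty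
  else if game_filter = "specific" ∧ selected_games.getD [] ≠ [] then
    props.foldl (fun acc prop =>
      if (selected_games.getD []).contains (pvGid prop) then acc ++ [prop] else acc) []
  else props

-- ===== PORT B =====
-- counts[gid] = counts.get(gid, 0) + 1
def pvBStep (c : PySem.Dict String Int) (prop : List (String × String)) : PySem.Dict String Int :=
  c.modify (pvGid prop) 0 (fun n => n + 1)

-- best, best_n updated on strict 'n > best_n'
def pvBMax (l : List (String × Int)) (acc : Option String × Int) : Option String × Int :=
  l.foldl (fun bb kv => if bb.2 < kv.2 then (some kv.1, kv.2) else bb) acc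

def filter_props_by_game_alt (props : List (List (String × String))) (game_filter : String) (selected_games : Option (List String)) : List (List (String × String)) :=
  if game_filter = "any" then
    (props.foldl (fun (d : PySem.Dict String (List (String × String))) prop =>
      let gid := pvGid prop
      if d.contains gid then d else d.insert gid prop) PySem.Dict.empty).values
  else if game_filter = "single" then
    if props = [] then []
    else
      let best := (pvBMax (props.foldl pvBStep PySem.Dict.empty).items (none, 0)).1
      props.filter (fun p => some (pvGid p) == best)
  else if game_filter = "specific" ∧ selected_games.getD [] ≠ [] then
    props.filter (fun p => (PySem.Set.ofList (selected_games.getD [])).contains (pvGid p))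
  else props

-- ===== PRECONDITION & SPEC =====
-- Pre_ excludes exactly the inputs on which A raises KeyError: a prop missing the 'team' or
-- 'opponent' key while a branch that evaluates the f-string is active.
def Pre_filter_props_by_game (props : List (List (String × String))) (game_filter : String) (selected_games : Option (List String)) : Prop :=
  (game_filter = "any" ∨ game_filter = "single" ∨
      (game_filter = "specific" ∧ selected_games.getD [] ≠ [])) →
    ∀ prop ∈ props,
      ((PySem.Dict.ofList prop).get? "team").isSome ∧
      ((PySem.Dict.ofList prop).get? "opponent").isSome
instance (props : List (List (String × String))) (game_filter : String) (selected_games : Option (List String)) : Decidable (Pre_filter_props_by_game props game_filter selected_games) := by unfold Pre_filter_props_by_game; infer_instance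

def pvWitness_filter_props_by_game : (List (List (String × String))) × String × Option (List String) :=
  ([[("team", "LAL"), ("opponent", "GSW")], [("team", "BOS"), ("opponent", "MIA")]], "single", none)

def Spec_filter_props_by_game (props : List (List (String × String))) (game_filter : String) (selected_games : Option (List String)) (out : List (List (String × String))) : Prop := out = filter_props_by_game_alt props game_filter selected_games
instance (props : List (List (String × String))) (game_filter : String) (selected_games : Option (List String)) (out : List (List (String × String))) : Decidable (Spec_filter_props_by_game props game_filter selected_games out) := by unfold Spec_filter_props_by_game; infer_instance

-- ===== CLAIM (what is proved, stated in full; the proofs are below) =====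
def Claim_equal_filter_props_by_game : Prop := ∀ (props : List (List (String × String))) (game_filter : String) (selected_games : Option (List String)), Dom_filter_props_by_game props game_filter selected_games → Pre_filter_props_by_game props game_filter selected_games → Spec_filter_props_by_game props game_filter selected_games (filter_props_by_game props game_filter selected_games)

-- ===== LEMMAS AND PROOFS =====

-- -------- 'any' branch --------
theorem pv_any_loop (ps : List (List (String × String)))
    (s : PySem.Set String) (out : List (List (String × String)))
    (d : PySem.Dict String (List (String × String)))
    (hs : s = d.items.map Prod.fst) (hout : out = d.values) :
    (ps.foldl (fun (st : PySem.Set String × List (List (String × String))) prop =>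
      let gid := pvGid prop
      if st.1.contains gid then st else (st.1.add gid, st.2 ++ [prop])) (s, out)).2
      = (ps.foldl (fun (d : PySem.Dict String (List (String × String))) prop =>
      let gid := pvGid prop
      if d.contains gid then d else d.insert gid prop) d).values := by
  induction ps generalizing s out d with
  | nil => simpa using hout
  | cons p ps ih =>
    simp only [List.foldl_cons]
    have hbeq : ∀ a b : String, (a == b) = (b == a) := by
      intro a b
      by_cases hab : a = b
      · subst hab; rfl
      · have hba : ¬ b = a := fun hh => hab hh.symm
        simp [hab, hba]
    have key : ∀ (L : List (String × List (String × String))) (g : String),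
        (L.map Prod.fst).contains g = L.any (fun kv => kv.1 == g) := by
      intro L g
      induction L with
      | nil => rfl
      | cons kv L ihL => rw [List.map_cons, List.contains_cons, List.any_cons, ihL, hbeq]
    have hc : s.contains (pvGid p) = d.contains (pvGid p) := by
      subst hs; exact key d.items (pvGid p)
    by_cases h : d.contains (pvGid p) = true
    · simp only [hc, h, if_true]
      exact ih s out d hs hout
    · rw [Bool.not_eq_true] at h
      simp only [hc, h, if_false, Bool.false_eq_true]
      refine ih _ _ _ ?_ ?_
      · subst hs
        have h2 : (List.map Prod.fst d.items).contains (pvGid p) = false :=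
          (key d.items (pvGid p)).trans h
        unfold PySem.Set.add PySem.Set.contains PySem.Dict.insert
        rw [if_neg (by rw [h2]; simp), if_neg (by rw [h]; simp)]
        simp
      · subst hout
        show d.values ++ [p] = (d.insert (pvGid p) p).values
        unfold PySem.Dict.insert
        rw [if_neg (by rw [h]; simp)]
        simp [PySem.Dict.values]

-- -------- 'single' branch --------

-- every stored group is exactly the filter of the processed props by its key, and is nonempty;
-- an absent key has empty filter
theorem pv_group_spec (ps : List (List (String × String))) :
    (∀ kv ∈ (ps.foldl pvAStep PySem.Dict.empty).items,
        kv.2 = ps.filter (fun p => pvGid p == kv.1) ∧ kv.2 ≠ []) ∧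
    (∀ k, (ps.foldl pvAStep PySem.Dict.empty).contains k = false →
        ps.filter (fun p => pvGid p == k) = []) := by
  induction ps using List.reverseRecOn with
  | nil =>
    refine ⟨fun kv hkv => ?_, fun k _ => rfl⟩
    simp [PySem.Dict.empty] at hkv
  | append_singleton ps p ih =>
    obtain ⟨ih1, ih2⟩ := ih
    rw [List.foldl_append]
    simp only [List.foldl_cons, List.foldl_nil]
    generalize hd : ps.foldl pvAStep PySem.Dict.empty = d at ih1 ih2
    have hfilter : ∀ k, (ps ++ [p]).filter (fun q => pvGid q == k)
        = ps.filter (fun q => pvGid q == k) ++ (if pvGid p = k then [p] else []) := by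
      intro k
      rw [List.filter_append]
      congr 1
      by_cases hgk : pvGid p = k <;> simp [hgk]
    have hnokey : d.contains (pvGid p) = false → ∀ q ∈ d.items, q.1 ≠ pvGid p := by
      intro hc q hq
      unfold PySem.Dict.contains at hc
      rw [List.any_eq_false] at hc
      simpa using hc q hq
    unfold pvAStep PySem.Dict.modify PySem.Dict.insert
    by_cases hc : d.contains (pvGid p) = true
    · -- an existing group gets p appended
      rw [if_pos hc]
      have hfind : ∃ kv0, List.find? (fun q => q.1 == pvGid p) d.items = some kv0 := by
        unfold PySem.Dict.contains at hc
        rw [List.any_eq_true] at hc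
        obtain ⟨q, hq, hqg⟩ := hc
        cases hf : List.find? (fun q => q.1 == pvGid p) d.items with
        | none => exact absurd hqg (by simpa using List.find?_eq_none.mp hf q hq)
        | some kv0 => exact ⟨kv0, rfl⟩
      obtain ⟨kv0, hkv0⟩ := hfind
      have hkv0mem : kv0 ∈ d.items := List.mem_of_find?_eq_some hkv0
      have hkv0key : kv0.1 = pvGid p := by simpa using List.find?_some hkv0
      have hgetD : d.getD (pvGid p) [] = kv0.2 := by
        simp [PySem.Dict.getD, PySem.Dict.get?, hkv0]
      have hkv0val : kv0.2 = ps.filter (fun q => pvGid q == pvGid p) := by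
        rw [(ih1 kv0 hkv0mem).1, hkv0key]
      refine ⟨fun kv hkv => ?_, fun k hk => ?_⟩
      · obtain ⟨kv1, hkv1, rfl⟩ := List.mem_map.mp hkv
        by_cases hk1 : kv1.1 = pvGid p
        · rw [if_pos (show (kv1.1 == pvGid p) = true by simp [hk1])]
          refine ⟨?_, by simp⟩
          simp [hgetD, hfilter (pvGid p), hkv0val]
        · rw [if_neg (show ¬ (kv1.1 == pvGid p) = true by simp [hk1])]
          refine ⟨?_, (ih1 kv1 hkv1).2⟩
          rw [hfilter kv1.1, if_neg (fun h' => hk1 h'.symm)]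
          simp [(ih1 kv1 hkv1).1]
      · -- the mapped items have the same keys as d
        have hck : d.contains k = false := by
          unfold PySem.Dict.contains at hk ⊢
          rw [List.any_eq_false] at hk ⊢
          intro q hq
          have hq' := hk _ (List.mem_map.mpr ⟨q, hq, rfl⟩)
          by_cases hqg : q.1 = pvGid p
          · simpa [hqg] using hq'
          · simpa [hqg] using hq'
        have hkg : pvGid p ≠ k := by
          intro h'
          rw [← h'] at hck
          exact absurd hc (by simp [hck])
        rw [hfilter k, ih2 k hck, if_neg hkg]
        rfl
    · -- a fresh group [p] is appended
      rw [if_neg hc]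
      rw [Bool.not_eq_true] at hc
      have hnone : List.find? (fun q => q.1 == pvGid p) d.items = none := by
        rw [List.find?_eq_none]
        intro q hq
        simpa using hnokey hc q hq
      have hgetD : d.getD (pvGid p) [] = [] := by
        simp [PySem.Dict.getD, PySem.Dict.get?, hnone]
      refine ⟨fun kv hkv => ?_, fun k hk => ?_⟩
      · rw [List.mem_append] at hkv
        rcases hkv with hkv | hkv
        · refine ⟨?_, (ih1 kv hkv).2⟩
          rw [hfilter kv.1, if_neg (fun h' => hnokey hc kv hkv h'.symm)]
          simp [(ih1 kv hkv).1]
        · simp only [List.mem_singleton] at hkv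
          subst hkv
          refine ⟨?_, by simp [hgetD]⟩
          simp only [hgetD, List.nil_append]
          rw [hfilter (pvGid p), ih2 (pvGid p) hc, if_pos rfl]
          rfl
      · unfold PySem.Dict.contains at hk
        rw [List.any_eq_false] at hk
        have hgk : pvGid p ≠ k := by
          simpa using hk (pvGid p, d.getD (pvGid p) [] ++ [p]) (by simp)
        have hck : d.contains k = false := by
          unfold PySem.Dict.contains
          rw [List.any_eq_false]
          intro q hq
          exact hk q (by simp [hq])
        rw [hfilter k, ih2 k hck, if_neg hgk]
        rfl

-- the counts dict is the groups dict with each group replaced by its length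
theorem pv_counts_items (ps : List (List (String × String)))
    (c : PySem.Dict String Int) (d : PySem.Dict String (List (List (String × String))))
    (h : c.items = d.items.map (fun kv => (kv.1, (kv.2.length : Int)))) :
    (ps.foldl pvBStep c).items
      = (ps.foldl pvAStep d).items.map (fun kv => (kv.1, (kv.2.length : Int))) := by
  induction ps generalizing c d with
  | nil => simpa using h
  | cons p ps ih =>
    simp only [List.foldl_cons]
    refine ih _ _ ?_
    set g := pvGid p with hg
    have hget : c.get? g = (d.get? g).map (fun l => (l.length : Int)) := by
      simp only [PySem.Dict.get?, h, List.find?_map, Option.map_map]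
      rfl
    have hcont : c.contains g = d.contains g := by
      simp only [PySem.Dict.contains, h, List.any_map]
      rfl
    unfold pvBStep pvAStep PySem.Dict.modify PySem.Dict.insert
    simp only [← hg, hcont]
    by_cases hc : d.contains g = true
    · rw [if_pos hc, if_pos hc]
      have hfind : ∃ kv0, List.find? (fun q => q.1 == g) d.items = some kv0 := by
        unfold PySem.Dict.contains at hc
        rw [List.any_eq_true] at hc
        obtain ⟨q, hq, hqg⟩ := hc
        cases hf : List.find? (fun q => q.1 == g) d.items with
        | none => exact absurd hqg (by simpa using List.find?_eq_none.mp hf q hq)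
        | some kv0 => exact ⟨kv0, rfl⟩
      obtain ⟨kv0, hkv0⟩ := hfind
      have hgd : d.getD g [] = kv0.2 := by simp [PySem.Dict.getD, PySem.Dict.get?, hkv0]
      have hgc : c.getD g 0 = (kv0.2.length : Int) := by
        have h5 : c.get? g = some ((kv0.2.length : Int)) := by
          rw [hget]
          simp [PySem.Dict.get?, hkv0]
        simp [PySem.Dict.getD, h5]
      simp only [h, List.map_map]
      apply List.map_congr_left
      intro kv hkv
      by_cases hk : (kv.1 == g) = true
      · simp [Function.comp, hk, hgd, hgc]
      · simp [Function.comp, hk]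
    · rw [if_neg hc, if_neg hc]
      have hnone : List.find? (fun q => q.1 == g) d.items = none := by
        rw [List.find?_eq_none]
        intro q hq
        unfold PySem.Dict.contains at hc
        simp only [Bool.not_eq_true] at hc
        rw [List.any_eq_false] at hc
        exact hc q hq
      have hgd : d.getD g [] = [] := by simp [PySem.Dict.getD, PySem.Dict.get?, hnone]
      have hgc : c.getD g 0 = 0 := by
        have h5 : c.get? g = none := by
          rw [hget]
          simp [PySem.Dict.get?, hnone]
        simp [PySem.Dict.getD, h5]
      simp [h, hgd, hgc]

def pvRel (a : Option (String × List (List (String × String)))) (b : Option String × Int) : Prop :=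
  b = (match a with
       | none => (none, 0)
       | some kv => (some kv.1, (kv.2.length : Int)))

theorem pv_max_rel (L : List (String × List (List (String × String))))
    (hne : ∀ kv ∈ L, kv.2 ≠ []) (a : Option (String × List (List (String × String))))
    (b : Option String × Int) (hab : pvRel a b) :
    pvRel (pvAMax L a) (pvBMax (L.map (fun kv => (kv.1, (kv.2.length : Int)))) b) := by
  induction L generalizing a b with
  | nil => simpa [pvAMax, pvBMax] using hab
  | cons kv L ihL =>
    simp only [List.map_cons]
    unfold pvAMax pvBMax
    simp only [List.foldl_cons]
    unfold pvRel at hab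
    subst hab
    have hkv : kv.2 ≠ [] := hne kv (by simp)
    have hlen : (0 : Int) < (kv.2.length : Int) := by
      have : 0 < kv.2.length := List.length_pos_iff.mpr hkv
      exact_mod_cast this
    have hne' : ∀ q ∈ L, q.2 ≠ [] := fun q hq => hne q (List.mem_cons_of_mem _ hq)
    cases a with
    | none =>
      dsimp only
      rw [if_pos hlen]
      exact ihL hne' (some kv) _ rfl
    | some b0 =>
      dsimp only
      by_cases hcmp : b0.2.length < kv.2.length
      · rw [if_pos hcmp, if_pos (by exact_mod_cast hcmp)]
        exact ihL hne' (some kv) _ rfl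
      · rw [if_neg hcmp, if_neg (by exact_mod_cast hcmp)]
        exact ihL hne' (some b0) _ rfl

theorem pv_max_mem (L : List (String × List (List (String × String))))
    (a : String × List (List (String × String))) :
    ∃ b, pvAMax L (some a) = some b ∧ (b = a ∨ b ∈ L) := by
  induction L generalizing a with
  | nil => exact ⟨a, rfl, Or.inl rfl⟩
  | cons kv L ihL =>
    unfold pvAMax
    simp only [List.foldl_cons]
    by_cases hcmp : a.2.length < kv.2.length
    · rw [if_pos hcmp]
      obtain ⟨b, hb, hmem⟩ := ihL kv
      refine ⟨b, hb, Or.inr ?_⟩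
      rcases hmem with rfl | hmem
      · simp
      · simp [hmem]
    · rw [if_neg hcmp]
      obtain ⟨b, hb, hmem⟩ := ihL a
      refine ⟨b, hb, ?_⟩
      rcases hmem with rfl | hmem
      · exact Or.inl rfl
      · exact Or.inr (by simp [hmem])

theorem pv_single (props : List (List (String × String))) (hne : props ≠ []) :
    (match pvAMax (props.foldl pvAStep PySem.Dict.empty).items none with
      | some best => best.2
      | none => ([] : List (List (String × String))))
    = props.filter (fun p =>
        some (pvGid p) == (pvBMax (props.foldl pvBStep PySem.Dict.empty).items (none, 0)).1) := by
  obtain ⟨p0, ps0, rfl⟩ : ∃ a l, props = a :: l := by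
    cases props with
    | nil => exact absurd rfl hne
    | cons a l => exact ⟨a, l, rfl⟩
  obtain ⟨h1, h2⟩ := pv_group_spec (p0 :: ps0)
  have hc0 : ((p0 :: ps0).foldl pvAStep PySem.Dict.empty).contains (pvGid p0) = true := by
    by_contra hc
    rw [Bool.not_eq_true] at hc
    have h3 := h2 (pvGid p0) hc
    simp at h3
  have hitems : ((p0 :: ps0).foldl pvAStep PySem.Dict.empty).items ≠ [] := by
    intro hx
    unfold PySem.Dict.contains at hc0
    rw [hx] at hc0
    simp at hc0
  cases hi : ((p0 :: ps0).foldl pvAStep PySem.Dict.empty).items with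
  | nil => exact absurd hi hitems
  | cons i0 rest =>
    obtain ⟨b, hb, hbmem'⟩ := pv_max_mem rest i0
    have hbmem : b ∈ ((p0 :: ps0).foldl pvAStep PySem.Dict.empty).items := by
      rw [hi]
      rcases hbmem' with rfl | hm
      · simp
      · simp [hm]
    have hA : pvAMax ((p0 :: ps0).foldl pvAStep PySem.Dict.empty).items none = some b := by
      rw [hi]
      unfold pvAMax at hb ⊢
      simpa using hb
    have hci : ((p0 :: ps0).foldl pvBStep PySem.Dict.empty).items
        = ((p0 :: ps0).foldl pvAStep PySem.Dict.empty).items.map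
            (fun kv => (kv.1, (kv.2.length : Int))) :=
      pv_counts_items (p0 :: ps0) _ _ (by simp [PySem.Dict.empty])
    have hrel := pv_max_rel ((p0 :: ps0).foldl pvAStep PySem.Dict.empty).items
      (fun kv hkv => (h1 kv hkv).2) none (none, 0) rfl
    rw [hA] at hrel
    unfold pvRel at hrel
    rw [hi] at hA
    rw [hA, hci, hrel]
    dsimp only
    rw [(h1 b hbmem).1]
    rfl

-- -------- 'specific' branch --------
theorem pv_specific (props : List (List (String × String))) (sel : List String) :
    props.foldl (fun acc prop =>
      if sel.contains (pvGid prop) then acc ++ [prop] else acc) []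
    = props.filter (fun p => (PySem.Set.ofList sel).contains (pvGid p)) := by
  have hp : (fun p => (PySem.Set.ofList sel).contains (pvGid p))
      = (fun p => sel.contains (pvGid p)) := by
    funext p
    simp [PySem.Set.mem_ofList]
  rw [hp]
  simpa using PySem.List.foldl_append_if (fun p => sel.contains (pvGid p)) id props []

-- ===== VERDICT (by name: the statement is the Claim_ definition above) =====
theorem filter_props_by_game_spec : Claim_equal_filter_props_by_game := by
  intro props gf sel _ _
  unfold Spec_filter_props_by_game filter_props_by_game filter_props_by_game_alt
  split_ifs with h1 h2 h3 h4
  · exact pv_any_loop props _ _ _ rfl rfl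
  · rfl
  · exact pv_single props h3
  · exact pv_specific props _
  · rfl
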